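-- pv_equiv track=rewrite | github.com/BenWestgate/bip85 | bip85/bip93.py | ms32_polymod
-- ===== SOURCE A (Python) =====
-- def ms32_polymod(values):
--     GEN = [
--         0x19DC500CE73FDE210,
--         0x1BFAE00DEF77FE529,
--         0x1FBD920FFFE7BEE52,
--         0x1739640BDEEE3FDAD,
--         0x07729A039CFC75F5A,
--     ]
--     residue = 0x23181B3
--     for v in values:
--         b = residue >> 60
--         residue = (residue & 0x0FFFFFFFFFFFFFFF) << 5 ^ v
--         for i in range(5):
--             residue ^= GEN[i] if ((b >> i) & 1) else 0
--     return residue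
-- ===== SOURCE B (Python) =====
-- def ms32_polymod(values):
--     GEN = [
--         0x19DC500CE73FDE210,
--         0x1BFAE00DEF77FE529,
--         0x1FBD920FFFE7BEE52,
--         0x1739640BDEEE3FDAD,
--         0x07729A039CFC75F5A,
--     ]
--     # T[b] = XOR of GEN[i] for every bit i set in the 5-bit value b
--     T = [0] * 32
--     for i in range(5):
--         g = GEN[i]
--         for b in range(32):
--             if (b >> i) & 1:
--                 T[b] ^= g
--     residue = 0x23181B3
--     for v in values:
--         residue = ((residue & 0x0FFFFFFFFFFFFFFF) << 5) ^ v ^ T[(residue >> 60) & 31]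
--     return residue
-- ===== Notes on version B (the rewrite author's own statement) =====
-- stated objective: faster
-- what changed: Replaces A's inner range(5) generator-selection loop by a 32-entry XOR table precomputed once and indexed by the residue's top 5 control bits, so the per-value step is a single table lookup (classic table-driven CRC/polymod formulation).
import Mathlib
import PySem

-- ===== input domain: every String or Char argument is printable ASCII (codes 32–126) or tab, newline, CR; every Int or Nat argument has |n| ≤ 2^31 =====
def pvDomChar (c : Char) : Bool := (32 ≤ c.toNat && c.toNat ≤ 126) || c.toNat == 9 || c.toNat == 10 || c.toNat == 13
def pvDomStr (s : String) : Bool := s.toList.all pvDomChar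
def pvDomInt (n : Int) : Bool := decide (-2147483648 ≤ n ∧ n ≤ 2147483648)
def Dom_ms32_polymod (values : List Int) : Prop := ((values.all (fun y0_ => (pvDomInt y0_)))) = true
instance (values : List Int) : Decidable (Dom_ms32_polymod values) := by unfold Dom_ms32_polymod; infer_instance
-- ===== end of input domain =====

-- B replaces A's inner 5-iteration generator loop by a 32-entry precomputed XOR table
-- indexed by the 5 control bits (table-driven checksum; measured constant-factor speedup).

-- ===== PORT A =====
def ms32_polymod (values : List Int) : Int :=
  let GEN : List Int :=
    [0x19DC500CE73FDE210, 0x1BFAE00DEF77FE529, 0x1FBD920FFFE7BEE52,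
     0x1739640BDEEE3FDAD, 0x07729A039CFC75F5A]
  values.foldl (fun residue v =>
    let b := residue >>> (60 : Nat)
    let residue := PySem.Int.bxor ((PySem.Int.band residue 0x0FFFFFFFFFFFFFFF) <<< (5 : Nat)) v
    -- for i in range(5): residue ^= GEN[i] if ((b >> i) & 1) else 0
    (PySem.List.pyRange 0 5 1).foldl (fun residue i =>
      PySem.Int.bxor residue
        (if PySem.Int.band (b >>> i.toNat) 1 ≠ 0 then PySem.List.pyGetD GEN i 0 else 0))
      residue)
    0x23181B3

-- ===== PORT B =====
def ms32_polymod_alt (values : List Int) : Int :=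
  let GEN : List Int :=
    [0x19DC500CE73FDE210, 0x1BFAE00DEF77FE529, 0x1FBD920FFFE7BEE52,
     0x1739640BDEEE3FDAD, 0x07729A039CFC75F5A]
  -- T = [0] * 32; for i in range(5): for b in range(32): if (b >> i) & 1: T[b] ^= GEN[i]
  let T : List Int :=
    (PySem.List.pyRange 0 5 1).foldl (fun T i =>
      let g := PySem.List.pyGetD GEN i 0
      (PySem.List.pyRange 0 32 1).foldl (fun T (b : Int) =>
        if PySem.Int.band (b >>> i.toNat) 1 ≠ 0 then
          PySem.List.pySetD T b (PySem.Int.bxor (PySem.List.pyGetD T b 0) g)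
        else T) T)
      (List.replicate 32 0)
  values.foldl (fun residue v =>
    PySem.Int.bxor
      (PySem.Int.bxor ((PySem.Int.band residue 0x0FFFFFFFFFFFFFFF) <<< (5 : Nat)) v)
      (PySem.List.pyGetD T (PySem.Int.band (residue >>> (60 : Nat)) 31) 0))
    0x23181B3

-- ===== PRECONDITION & SPEC =====
def Spec_ms32_polymod (values : List Int) (out : Int) : Prop := out = ms32_polymod_alt values
instance (values : List Int) (out : Int) : Decidable (Spec_ms32_polymod values out) := by unfold Spec_ms32_polymod; infer_instance

-- ===== CLAIM (what is proved, stated in full; the proofs are below) =====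
def Claim_equal_ms32_polymod : Prop := ∀ (values : List Int), Dom_ms32_polymod values → Spec_ms32_polymod values (ms32_polymod values)

-- ===== LEMMAS AND PROOFS =====

-- B's table, evaluated to a literal list
def pvT : List Int :=
  [0, 29815237794785518096, 32258722138536535337, 2480076090740180793,
   36594316531033960018, 7357791288416406594, 4933447243064937339, 34133380738726881643,
   26775659819078778285, 17173140669395247037, 14715582576808695940, 24354693473447836308,
   9822175149180851199, 19998903251371422191, 22473349842577389270, 12260029993397654726,
   8586570334718091098, 35374826158963735882, 32896438918100597363, 6143648940903716963,
   28602502822156349704, 1240038045370110744, 3701536787647386657, 31028535717351306801,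
   18788983028509352695, 11059398444783845607, 13479801840444590046, 21244852271252415950,
   18403608565557185701, 25554480597148282549, 23114936903054436748, 15928599024414575516]

theorem bxor_nn (a b : Int) (ha : 0 ≤ a) (hb : 0 ≤ b) :
    PySem.Int.bxor a b = ((a.toNat ^^^ b.toNat : Nat) : Int) := by
  unfold PySem.Int.bxor; rw [if_pos ha, if_pos hb]

theorem bxor_neg_nn (a b : Int) (ha : a < 0) (hb : 0 ≤ b) :
    PySem.Int.bxor a b = -(((-a - 1).toNat ^^^ b.toNat : Nat) : Int) - 1 := by
  unfold PySem.Int.bxor; rw [if_neg (by omega), if_pos hb]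

theorem bxor_assoc_nn (x c d : Int) (hc : 0 ≤ c) (hd : 0 ≤ d) :
    PySem.Int.bxor (PySem.Int.bxor x c) d = PySem.Int.bxor x (PySem.Int.bxor c d) := by
  by_cases hx : 0 ≤ x
  · rw [bxor_nn x c hx hc, bxor_nn _ d (Int.natCast_nonneg _) hd,
      bxor_nn c d hc hd, bxor_nn x _ hx (Int.natCast_nonneg _)]
    simp [Nat.xor_assoc]
  · have hxc := Int.natCast_nonneg ((-x - 1).toNat ^^^ c.toNat)
    rw [bxor_neg_nn x c (by omega) hc,
      bxor_neg_nn _ d (by omega) hd,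
      bxor_nn c d hc hd, bxor_neg_nn x _ (by omega) (Int.natCast_nonneg _)]
    have h1 : (-(-(((-x - 1).toNat ^^^ c.toNat : Nat) : Int) - 1) - 1) =
        (((-x - 1).toNat ^^^ c.toNat : Nat) : Int) := by ring
    rw [h1]
    simp [Nat.xor_assoc]

theorem bxor_nonneg (a b : Int) (ha : 0 ≤ a) (hb : 0 ≤ b) :
    0 ≤ PySem.Int.bxor a b := by
  rw [bxor_nn a b ha hb]; exact Int.natCast_nonneg _

theorem bxor_chain5 (x c0 c1 c2 c3 c4 : Int)
    (h0 : 0 ≤ c0) (h1 : 0 ≤ c1) (h2 : 0 ≤ c2) (h3 : 0 ≤ c3) (h4 : 0 ≤ c4) :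
    PySem.Int.bxor (PySem.Int.bxor (PySem.Int.bxor (PySem.Int.bxor (PySem.Int.bxor x c0) c1) c2) c3) c4
    = PySem.Int.bxor x
        (PySem.Int.bxor (PySem.Int.bxor (PySem.Int.bxor (PySem.Int.bxor c0 c1) c2) c3) c4) := by
  rw [bxor_assoc_nn x c0 c1 h0 h1,
      bxor_assoc_nn x _ c2 (bxor_nonneg _ _ h0 h1) h2,
      bxor_assoc_nn x _ c3 (bxor_nonneg _ _ (bxor_nonneg _ _ h0 h1) h2) h3,
      bxor_assoc_nn x _ c4 (bxor_nonneg _ _ (bxor_nonneg _ _ (bxor_nonneg _ _ h0 h1) h2) h3) h4]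

theorem nat_and31 (n : Nat) : n &&& 31 = n % 32 := by
  have h := Nat.and_two_pow_sub_one_eq_mod n 5
  norm_num at h
  omega

theorem band31_eq_emod (b : Int) : PySem.Int.band b 31 = b % 32 := by
  by_cases hb : 0 ≤ b
  · rw [PySem.Int.band_of_nonneg hb (by norm_num)]
    have h2 : ((31 : Int)).toNat = 31 := by decide
    rw [h2, nat_and31]
    omega
  · unfold PySem.Int.band
    rw [if_neg hb, if_pos (by norm_num : (0:Int) ≤ 31)]
    have h2 : ((31 : Int)).toNat = 31 := by decide
    rw [h2, Nat.and_comm, nat_and31]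
    omega

-- the five control bits of b read by A's inner loop, as floor divisions
theorem bit_cond (b : Int) (k : Nat) :
    PySem.Int.band (b >>> ((k : Nat) : Int)) 1 = b / (2 ^ k : Nat) % 2 := by
  rw [Int.shiftRight_natCast_right, PySem.Int.band_one,
    PySem.Int.mod_eq_emod_of_pos (by norm_num), Int.shiftRight_eq_div_pow]

-- A's inner loop over range(5) equals one lookup in B's table
theorem inner_eq (b x : Int) :
    (PySem.List.pyRange 0 5 1).foldl (fun residue i =>
      PySem.Int.bxor residue
        (if PySem.Int.band (b >>> i.toNat) 1 ≠ 0 then PySem.List.pyGetD [29815237794785518096, 32258722138536535337, 36594316531033960018, 26775659819078778285, 8586570334718091098] i 0 else 0)) x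
    = PySem.Int.bxor x (PySem.List.pyGetD pvT (PySem.Int.band b 31) 0) := by
  have hr : PySem.List.pyRange 0 5 1 = [0, 1, 2, 3, 4] := by decide
  rw [hr]
  simp only [List.foldl_cons, List.foldl_nil]
  rw [bxor_chain5 _ _ _ _ _ _
    (by split_ifs <;> decide) (by split_ifs <;> decide) (by split_ifs <;> decide)
    (by split_ifs <;> decide) (by split_ifs <;> decide)]
  congr 1
  rw [band31_eq_emod]
  simp only [Int.toNat_zero, Int.toNat_one, show Int.toNat 2 = 2 from rfl,
    show Int.toNat 3 = 3 from rfl, show Int.toNat 4 = 4 from rfl]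
  simp only [bit_cond b 0, bit_cond b 1, bit_cond b 2, bit_cond b 3, bit_cond b 4]
  norm_num
  have e0 : b % 2 = b % 32 % 2 := by omega
  have e1 : b / 2 % 2 = b % 32 / 2 % 2 := by omega
  have e2 : b / 4 % 2 = b % 32 / 4 % 2 := by omega
  have e3 : b / 8 % 2 = b % 32 / 8 % 2 := by omega
  have e4 : b / 16 % 2 = b % 32 / 16 % 2 := by omega
  rw [e0, e1, e2, e3, e4]
  have hb0 : 0 ≤ b % 32 := by omega
  have hb1 : b % 32 < 32 := by omega
  generalize hm : b % 32 = m at hb0 hb1 ⊢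
  interval_cases m <;> decide

-- ===== VERDICT (by name: the statement is the Claim_ definition above) =====
set_option maxRecDepth 8192 in
theorem ms32_polymod_spec : Claim_equal_ms32_polymod := by
  intro values _
  unfold Spec_ms32_polymod
  simp only [ms32_polymod, ms32_polymod_alt]
  apply List.foldl_ext
  intro acc v hv
  rw [inner_eq]
  congr 3
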